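-- pv_equiv track=rewrite | github.com/sugiza-k-eita/Atcoder | 276/d.py | two_by_three
-- ===== SOURCE A (Python) =====
-- def two_by_three(x):
--     two_cnt = 0
--     three_cnt = 0
--     while x%2==0 or x%3 == 0:
--         if x%2 == 0:
--             x//=2
--             two_cnt += 1
--         if x%3 == 0:
--             x//=3
--             three_cnt += 1
--     return x,two_cnt,three_cnt
-- ===== SOURCE B (Python) =====
-- def two_by_three(x):
--     # valuation by repeated squaring: val(n, p) = (e, n // p**e) with p**e the
--     # largest power of p dividing n (n >= 1)
--     def val(n, p):
--         if n % p != 0: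
--             return 0, n
--         e, m = val(n, p * p)
--         if m % p == 0:
--             return 2 * e + 1, m // p
--         return 2 * e, m
--     n = -x if x < 0 else x
--     two_cnt, n = val(n, 2)
--     three_cnt, n = val(n, 3)
--     return (-n if x < 0 else n), two_cnt, three_cnt
-- ===== Notes on version B (the rewrite author's own statement) =====
-- stated objective: alternative
-- what changed: Replaces A's interleaved repeated-division loop by a p-adic valuation computed via recursive squaring of the divisor (val(n,p) recurses on p*p and combines exponents as 2e or 2e+1), applied to |x| for p=2 then p=3, restoring the sign at the end.
import Mathlib
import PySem

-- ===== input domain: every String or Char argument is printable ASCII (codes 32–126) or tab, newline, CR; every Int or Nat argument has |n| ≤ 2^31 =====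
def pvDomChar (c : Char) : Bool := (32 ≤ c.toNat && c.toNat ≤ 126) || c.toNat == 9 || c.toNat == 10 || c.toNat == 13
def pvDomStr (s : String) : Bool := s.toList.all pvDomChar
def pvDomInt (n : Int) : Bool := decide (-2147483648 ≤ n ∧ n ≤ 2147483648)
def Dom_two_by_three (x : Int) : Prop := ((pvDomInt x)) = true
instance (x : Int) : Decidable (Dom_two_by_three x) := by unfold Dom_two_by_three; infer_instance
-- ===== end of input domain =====

-- B computes the 2- and 3-adic valuations of |x| by recursive squaring of the divisor
-- instead of A's interleaved repeated-division loop; same return value on x ≠ 0.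


-- termination helper for port A (cited by its decreasing_by)
theorem pvDivShrink (x d : Int) (hx : x ≠ 0) (hd : 2 ≤ d) (h : d ∣ x) :
    PySem.Int.floordiv x d ≠ 0 ∧ (PySem.Int.floordiv x d).natAbs < x.natAbs := by
  rw [PySem.Int.floordiv_eq_ediv_of_pos (by omega)]
  obtain ⟨k, rfl⟩ := h
  rw [Int.mul_ediv_cancel_left _ (by omega)]
  have hk : k ≠ 0 := by rintro rfl; simp at hx
  constructor
  · exact hk
  · rw [Int.natAbs_mul]
    have h1 : 1 ≤ k.natAbs := by omega
    have h2 : 2 ≤ d.natAbs := by omega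
    have h3 : 2 * k.natAbs ≤ d.natAbs * k.natAbs := Nat.mul_le_mul_right k.natAbs h2
    omega

-- ===== PORT A =====
-- the 'x ≠ 0' guard only makes the recursion total: the Python loops forever at x = 0 (outside Pre_)
def twoByThreeLoop (x a b : Int) : Int × Int × Int :=
  if hg : x ≠ 0 ∧ (PySem.Int.mod x 2 = 0 ∨ PySem.Int.mod x 3 = 0) then
    if h2 : PySem.Int.mod x 2 = 0 then
      -- x //= 2; two_cnt += 1; then test the NEW x against 3
      if h3 : PySem.Int.mod (PySem.Int.floordiv x 2) 3 = 0 then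
        twoByThreeLoop (PySem.Int.floordiv (PySem.Int.floordiv x 2) 3) (a + 1) (b + 1)
      else
        twoByThreeLoop (PySem.Int.floordiv x 2) (a + 1) b
    else
      -- guard held via x % 3 == 0
      twoByThreeLoop (PySem.Int.floordiv x 3) a (b + 1)
  else (x, a, b)
termination_by x.natAbs
decreasing_by
  · have hd2 := pvDivShrink x 2 hg.1 (by omega) ((PySem.Int.mod_eq_zero_iff_dvd x 2).mp h2)
    have hd3 := pvDivShrink (PySem.Int.floordiv x 2) 3 hd2.1 (by omega)
      ((PySem.Int.mod_eq_zero_iff_dvd _ 3).mp h3)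
    omega
  · have hd2 := pvDivShrink x 2 hg.1 (by omega) ((PySem.Int.mod_eq_zero_iff_dvd x 2).mp h2)
    omega
  · have h3 : PySem.Int.mod x 3 = 0 := by tauto
    have hd3 := pvDivShrink x 3 hg.1 (by omega) ((PySem.Int.mod_eq_zero_iff_dvd x 3).mp h3)
    omega

def two_by_three (x : Int) : Int × Int × Int := twoByThreeLoop x 0 0

-- termination helper for port B (cited by its decreasing_by)
theorem pvSqShrink (n p : Int) (h : 1 ≤ n ∧ 2 ≤ p ∧ PySem.Int.mod n p = 0) :
    (n + 1 - p * p).toNat < (n + 1 - p).toNat := by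
  have hdvd : p ∣ n := (PySem.Int.mod_eq_zero_iff_dvd n p).mp h.2.2
  have hple : p ≤ n := Int.le_of_dvd (by omega) hdvd
  have hsq : p < p * p := (lt_mul_iff_one_lt_left (by omega)).mpr (by omega)
  omega

-- ===== PORT B =====
-- val(n, p) of Source B: the '1 ≤ n' conjunct only makes the recursion total — Python's val
-- diverges at n = 0 (only reachable from x = 0, outside Pre_); on 1 ≤ n, 2 ≤ p the guard
-- is exactly Python's 'n % p != 0' test.
def pvVal (n p : Int) : Int × Int :=
  if h : 1 ≤ n ∧ 2 ≤ p ∧ PySem.Int.mod n p = 0 then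
    let r := pvVal n (p * p)
    if PySem.Int.mod r.2 p = 0 then (2 * r.1 + 1, PySem.Int.floordiv r.2 p)
    else (2 * r.1, r.2)
  else (0, n)
termination_by (n + 1 - p).toNat
decreasing_by exact pvSqShrink n p h

def two_by_three_alt (x : Int) : Int × Int × Int :=
  let n := if x < 0 then -x else x
  let p2 := pvVal n 2
  let p3 := pvVal p2.2 3
  ((if x < 0 then -p3.2 else p3.2), p2.1, p3.1)

-- ===== PRECONDITION & SPEC =====
-- Pre_ excludes only x = 0, on which the Python A loops forever and returns nothing.
def Pre_two_by_three (x : Int) : Prop := x ≠ 0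
instance (x : Int) : Decidable (Pre_two_by_three x) := by unfold Pre_two_by_three; infer_instance
def pvWitness_two_by_three : Int := (12)

def Spec_two_by_three (x : Int) (out : Int × Int × Int) : Prop := out = two_by_three_alt x
instance (x : Int) (out : Int × Int × Int) : Decidable (Spec_two_by_three x out) := by unfold Spec_two_by_three; infer_instance

-- ===== CLAIM (what is proved, stated in full; the proofs are below) =====
def Claim_equal_two_by_three : Prop := ∀ (x : Int), Dom_two_by_three x → Pre_two_by_three x → Spec_two_by_three x (two_by_three x)

-- ===== LEMMAS AND PROOFS =====

-- exact division: when d ∣ x, floor division is exact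
theorem pvFloordivExact (x d : Int) (hd : 0 < d) (h : d ∣ x) :
    x = d * PySem.Int.floordiv x d := by
  obtain ⟨k, rfl⟩ := h
  rw [PySem.Int.floordiv_eq_ediv_of_pos hd, Int.mul_ediv_cancel_left _ (by omega)]

-- characterization of pvVal: it returns (e, n / p^e) with p^e the largest power of p dividing n
theorem pvVal_char (n p : Int) (hn : 1 ≤ n) (hp : 2 ≤ p) :
    ∃ e : ℕ, (pvVal n p).1 = (e : Int) ∧ n = p ^ e * (pvVal n p).2 ∧ ¬ p ∣ (pvVal n p).2 := by
  fun_induction pvVal n p with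
  | case1 p h r hmod ih =>
    have hrdef : r = pvVal n (p * p) := rfl
    obtain ⟨e, he1, he2, he3⟩ := ih (by nlinarith [h.2.1])
    rw [← hrdef] at he1 he2 he3
    have hppow : (0:Int) < (p * p) ^ e := pow_pos (by nlinarith [h.2.1]) e
    have hr2pos : 1 ≤ r.2 := by nlinarith [he2, hn]
    have hdvd : p ∣ r.2 := (PySem.Int.mod_eq_zero_iff_dvd _ p).mp hmod
    have hex := pvFloordivExact r.2 p (by omega) hdvd
    refine ⟨2 * e + 1, by push_cast; rw [he1], ?_, ?_⟩
    · calc n = (p * p) ^ e * r.2 := he2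
        _ = (p * p) ^ e * (p * PySem.Int.floordiv r.2 p) := by rw [← hex]
        _ = p ^ (2 * e + 1) * PySem.Int.floordiv r.2 p := by rw [pow_succ, pow_mul]; ring
    · intro hd
      apply he3
      obtain ⟨k, hk⟩ := hd
      have hk' : PySem.Int.floordiv r.2 p = p * k := hk
      exact ⟨k, by rw [hex, hk']; ring⟩
  | case2 p h r hmod ih =>
    have hrdef : r = pvVal n (p * p) := rfl
    obtain ⟨e, he1, he2, he3⟩ := ih (by nlinarith [h.2.1])
    rw [← hrdef] at he1 he2 he3
    refine ⟨2 * e, by push_cast; rw [he1], ?_, ?_⟩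
    · calc n = (p * p) ^ e * r.2 := he2
        _ = p ^ (2 * e) * r.2 := by rw [pow_mul, pow_two]
    · intro hd; exact hmod ((PySem.Int.mod_eq_zero_iff_dvd _ p).mpr hd)
  | case3 p h =>
    refine ⟨0, rfl, by simp, ?_⟩
    intro hd
    exact h ⟨hn, hp, (PySem.Int.mod_eq_zero_iff_dvd n p).mpr hd⟩

-- characterization of A's loop: it factors x as 2^da * 3^db * r with r coprime to 6
theorem loop_char (x a b : Int) (hx : x ≠ 0) :
    ∃ (r : Int) (da db : ℕ), twoByThreeLoop x a b = (r, a + da, b + db) ∧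
      x = 2 ^ da * 3 ^ db * r ∧ ¬ (2:Int) ∣ r ∧ ¬ (3:Int) ∣ r := by
  fun_induction twoByThreeLoop x a b with
  | case1 x a b hg h2 h3 ih =>
    have hdvd2 : (2:Int) ∣ x := (PySem.Int.mod_eq_zero_iff_dvd x 2).mp h2
    have hx2 := pvDivShrink x 2 hg.1 (by omega) hdvd2
    have hdvd3 : (3:Int) ∣ PySem.Int.floordiv x 2 := (PySem.Int.mod_eq_zero_iff_dvd _ 3).mp h3
    have hx23 := pvDivShrink _ 3 hx2.1 (by omega) hdvd3
    obtain ⟨r, da, db, heq, hfact, hr2, hr3⟩ := ih hx23.1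
    refine ⟨r, da + 1, db + 1, by rw [heq]; push_cast; ring_nf, ?_, hr2, hr3⟩
    have e2 := pvFloordivExact x 2 (by omega) hdvd2
    have e3 := pvFloordivExact (PySem.Int.floordiv x 2) 3 (by omega) hdvd3
    calc x = 2 * (3 * PySem.Int.floordiv (PySem.Int.floordiv x 2) 3) := by rw [← e3, ← e2]
      _ = 2 * (3 * (2 ^ da * 3 ^ db * r)) := by rw [← hfact]
      _ = 2 ^ (da + 1) * 3 ^ (db + 1) * r := by ring
  | case2 x a b hg h2 h3 ih =>
    have hdvd2 : (2:Int) ∣ x := (PySem.Int.mod_eq_zero_iff_dvd x 2).mp h2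
    have hx2 := pvDivShrink x 2 hg.1 (by omega) hdvd2
    obtain ⟨r, da, db, heq, hfact, hr2, hr3⟩ := ih hx2.1
    refine ⟨r, da + 1, db, by rw [heq]; push_cast; ring_nf, ?_, hr2, hr3⟩
    have e2 := pvFloordivExact x 2 (by omega) hdvd2
    calc x = 2 * PySem.Int.floordiv x 2 := e2
      _ = 2 * (2 ^ da * 3 ^ db * r) := by rw [← hfact]
      _ = 2 ^ (da + 1) * 3 ^ db * r := by ring
  | case3 x a b hg h2 ih =>
    have h3 : PySem.Int.mod x 3 = 0 := by tauto
    have hdvd3 : (3:Int) ∣ x := (PySem.Int.mod_eq_zero_iff_dvd x 3).mp h3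
    have hx3 := pvDivShrink x 3 hg.1 (by omega) hdvd3
    obtain ⟨r, da, db, heq, hfact, hr2, hr3⟩ := ih hx3.1
    refine ⟨r, da, db + 1, by rw [heq]; push_cast; ring_nf, ?_, hr2, hr3⟩
    have e3 := pvFloordivExact x 3 (by omega) hdvd3
    calc x = 3 * PySem.Int.floordiv x 3 := e3
      _ = 3 * (2 ^ da * 3 ^ db * r) := by rw [← hfact]
      _ = 2 ^ da * 3 ^ (db + 1) * r := by ring
  | case4 x a b hg =>
    refine ⟨x, 0, 0, by simp, by ring, ?_, ?_⟩
    · intro hd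
      exact hg ⟨hx, Or.inl ((PySem.Int.mod_eq_zero_iff_dvd x 2).mpr hd)⟩
    · intro hd
      exact hg ⟨hx, Or.inr ((PySem.Int.mod_eq_zero_iff_dvd x 3).mpr hd)⟩

-- uniqueness of the p-power factorization
theorem pvUniqP (p : Int) (hp : Prime p) (c₁ c₂ : Int) (a₁ a₂ : ℕ)
    (h : p ^ a₁ * c₁ = p ^ a₂ * c₂) (h1 : ¬ p ∣ c₁) (h2 : ¬ p ∣ c₂) :
    a₁ = a₂ ∧ c₁ = c₂ := by
  induction a₁ generalizing a₂ with
  | zero =>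
    cases a₂ with
    | zero => simpa using h
    | succ k =>
      exfalso
      apply h1
      rw [pow_zero, one_mul] at h
      exact ⟨p ^ k * c₂, by rw [h, pow_succ]; ring⟩
  | succ j ih =>
    cases a₂ with
    | zero =>
      exfalso
      apply h2
      rw [pow_zero, one_mul] at h
      exact ⟨p ^ j * c₁, by rw [← h, pow_succ]; ring⟩
    | succ k =>
      have h' : p ^ j * c₁ = p ^ k * c₂ := by
        apply mul_left_cancel₀ hp.ne_zero
        calc p * (p ^ j * c₁) = p ^ (j + 1) * c₁ := by ring
          _ = p ^ (k + 1) * c₂ := h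
          _ = p * (p ^ k * c₂) := by ring
      obtain ⟨e1, e2⟩ := ih k h'
      exact ⟨by omega, e2⟩

theorem pvUniq (r₁ r₂ : Int) (a₁ b₁ a₂ b₂ : ℕ)
    (h : 2 ^ a₁ * 3 ^ b₁ * r₁ = 2 ^ a₂ * 3 ^ b₂ * r₂)
    (h21 : ¬ (2:Int) ∣ r₁) (h31 : ¬ (3:Int) ∣ r₁)
    (h22 : ¬ (2:Int) ∣ r₂) (h32 : ¬ (3:Int) ∣ r₂) :
    a₁ = a₂ ∧ b₁ = b₂ ∧ r₁ = r₂ := by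
  have nd1 : ¬ (2:Int) ∣ 3 ^ b₁ * r₁ := by
    intro hd
    rcases Int.prime_two.dvd_mul.mp hd with hd | hd
    · have := Int.prime_two.dvd_of_dvd_pow hd; omega
    · exact h21 hd
  have nd2 : ¬ (2:Int) ∣ 3 ^ b₂ * r₂ := by
    intro hd
    rcases Int.prime_two.dvd_mul.mp hd with hd | hd
    · have := Int.prime_two.dvd_of_dvd_pow hd; omega
    · exact h22 hd
  obtain ⟨ha, h'⟩ := pvUniqP 2 Int.prime_two (3 ^ b₁ * r₁) (3 ^ b₂ * r₂) a₁ a₂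
    (by linear_combination h) nd1 nd2
  obtain ⟨hb, hr⟩ := pvUniqP 3 Int.prime_three r₁ r₂ b₁ b₂ h' h31 h32
  exact ⟨ha, hb, hr⟩

-- assemble: for n = |x| (with sign s), B's value satisfies the same factorization as A's
theorem alt_agrees (x n : Int) (hx : x ≠ 0) (hn1 : 1 ≤ n) (s : Int)
    (hs : s = 1 ∨ s = -1) (hxn : x = s * n) :
    twoByThreeLoop x 0 0 = (s * (pvVal (pvVal n 2).2 3).2, (pvVal n 2).1, (pvVal (pvVal n 2).2 3).1) := by
  obtain ⟨e2, he21, he22, he23⟩ := pvVal_char n 2 hn1 (by omega)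
  have hq1 : 1 ≤ (pvVal n 2).2 := by
    by_contra hc
    have hpow : (0:Int) < 2 ^ e2 := pow_pos (by omega) e2
    nlinarith [he22, hn1]
  obtain ⟨e3, he31, he32, he33⟩ := pvVal_char (pvVal n 2).2 3 hq1 (by omega)
  have hnd2 : ¬ (2:Int) ∣ (pvVal (pvVal n 2).2 3).2 := by
    intro hd
    exact he23 (hd.trans ⟨3 ^ e3, by linear_combination he32⟩)
  have hsx : x = 2 ^ e2 * 3 ^ e3 * (s * (pvVal (pvVal n 2).2 3).2) := by
    linear_combination hxn + s * he22 + s * 2 ^ e2 * he32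
  have hs2 : ¬ (2:Int) ∣ s * (pvVal (pvVal n 2).2 3).2 := by
    rcases hs with rfl | rfl
    · simpa using hnd2
    · intro hd; exact hnd2 (by simpa using dvd_neg.mp (by simpa using hd))
  have hs3 : ¬ (3:Int) ∣ s * (pvVal (pvVal n 2).2 3).2 := by
    rcases hs with rfl | rfl
    · simpa using he33
    · intro hd; exact he33 (by simpa using dvd_neg.mp (by simpa using hd))
  obtain ⟨r, da, db, heq, hfact, hr2, hr3⟩ := loop_char x 0 0 hx
  obtain ⟨ha, hb, hr⟩ := pvUniq r (s * (pvVal (pvVal n 2).2 3).2) da db e2 e3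
    (by rw [← hfact, ← hsx]) hr2 hr3 hs2 hs3
  rw [heq, hr, ha, hb, he21, he31]
  simp

-- ===== VERDICT (by name: the statement is the Claim_ definition above) =====
theorem two_by_three_spec : Claim_equal_two_by_three := by
  intro x _ hx
  unfold Spec_two_by_three two_by_three two_by_three_alt
  by_cases hneg : x < 0
  · simp only [if_pos hneg]
    have := alt_agrees x (-x) hx (by omega) (-1) (Or.inr rfl) (by ring)
    rw [this]
    simp
  · simp only [if_neg hneg]
    have hx' : x ≠ 0 := hx
    have := alt_agrees x x hx (by omega) 1 (Or.inl rfl) (by ring)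
    rw [this]
    simp
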